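-- pv_equiv track=rewrite | github.com/ProCityHub/AGI | github_repository_scanner.py | assess_violation_severity
-- ===== SOURCE A (Python) =====
-- def assess_violation_severity(violation_type: str, match: str) -> str:
--     """Assess the severity of a violation"""
--
--     # Sacred symbol violations are always critical
--     if "swastika" in match.lower() and any(term in match.lower() for term in ["nazi", "hitler", "supremacy"]):
--         return "SACRED_VIOLATION"
--
--     # Religious freedom violations
--     if violation_type == "religious_freedom_violation":
--         if any(term in match.lower() for term in ["eliminate", "destroy", "persecute"]):
--             return "CRITICAL_VIOLATION"
--         return "MAJOR_VIOLATION"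
--
--     # Natural law violations
--     if violation_type == "natural_law_violation":
--         return "MAJOR_VIOLATION"
--
--     # Treaty violations
--     if violation_type == "treaty_violation":
--         return "MAJOR_VIOLATION"
--
--     # Sacred desecration
--     if violation_type == "sacred_desecration":
--         return "CRITICAL_VIOLATION"
--
--     return "MINOR_VIOLATION"
-- ===== SOURCE B (Python) =====
-- _LEVEL_NAMES = {1: "MINOR_VIOLATION", 2: "MAJOR_VIOLATION",
--                 3: "CRITICAL_VIOLATION", 4: "SACRED_VIOLATION"}
--
-- def assess_violation_severity(violation_type: str, match: str) -> str:
--     # Score every rule independently and take the maximum severity level.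
--     # Correct because the violation_type equality rules are mutually exclusive
--     # and the sacred-symbol rule carries the highest level, so the maximum of
--     # the satisfied rules' levels equals the first-match cascade's answer.
--     text = match.lower()
--     rules = [
--         ("swastika" in text and any(t in text for t in ("nazi", "hitler", "supremacy")), 4),
--         (violation_type == "religious_freedom_violation"
--          and any(t in text for t in ("eliminate", "destroy", "persecute")), 3),
--         (violation_type == "religious_freedom_violation", 2),
--         (violation_type == "natural_law_violation", 2),
--         (violation_type == "treaty_violation", 2),
--         (violation_type == "sacred_desecration", 3),
--         (True, 1),
--     ]
--     level = max(lvl for cond, lvl in rules if cond)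
--     return _LEVEL_NAMES[level]
-- ===== Notes on version B (the rewrite author's own statement) =====
-- stated objective: alternative
-- what changed: B replaces A's first-match if-cascade by a scoring scheme: every rule is evaluated independently into a (condition, numeric level) table, the maximum satisfied level is taken, and a level-to-name map produces the result; correct because the type-equality rules are mutually exclusive and the sacred-symbol rule has the top level.
import Mathlib
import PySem

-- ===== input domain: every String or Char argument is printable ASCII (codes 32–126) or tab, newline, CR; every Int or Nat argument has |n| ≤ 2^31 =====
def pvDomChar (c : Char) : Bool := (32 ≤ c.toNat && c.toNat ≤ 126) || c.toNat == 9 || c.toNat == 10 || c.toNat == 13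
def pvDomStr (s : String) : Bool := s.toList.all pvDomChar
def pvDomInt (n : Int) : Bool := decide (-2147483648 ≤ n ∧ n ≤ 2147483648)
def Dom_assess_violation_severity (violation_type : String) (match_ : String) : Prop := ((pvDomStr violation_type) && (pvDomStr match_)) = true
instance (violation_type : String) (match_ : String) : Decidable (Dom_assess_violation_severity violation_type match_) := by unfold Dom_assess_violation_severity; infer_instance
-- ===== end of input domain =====

-- B replaces A's first-match cascade by an independent rule-scoring table whose maximum level is mapped to a name (alternative decomposition, same cost).

-- ===== PORT A =====
def assess_violation_severity (violation_type : String) (match_ : String) : String :=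
  if PySem.Str.isIn "swastika" (PySem.Str.lower match_) &&
     (["nazi", "hitler", "supremacy"].any fun term => PySem.Str.isIn term (PySem.Str.lower match_)) then
    "SACRED_VIOLATION"
  else if violation_type == "religious_freedom_violation" then
    if ["eliminate", "destroy", "persecute"].any fun term => PySem.Str.isIn term (PySem.Str.lower match_) then
      "CRITICAL_VIOLATION"
    else
      "MAJOR_VIOLATION"
  else if violation_type == "natural_law_violation" then
    "MAJOR_VIOLATION"
  else if violation_type == "treaty_violation" then
    "MAJOR_VIOLATION"
  else if violation_type == "sacred_desecration" then
    "CRITICAL_VIOLATION"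
  else
    "MINOR_VIOLATION"

-- ===== PORT B =====
def levelNames : PySem.Dict Int String :=
  PySem.Dict.ofList [(1, "MINOR_VIOLATION"), (2, "MAJOR_VIOLATION"),
   (3, "CRITICAL_VIOLATION"), (4, "SACRED_VIOLATION")]

def assess_violation_severity_alt (violation_type : String) (match_ : String) : String :=
  let text := PySem.Str.lower match_
  let rules : List (Bool × Int) :=
    [(PySem.Str.isIn "swastika" text &&
        (["nazi", "hitler", "supremacy"].any fun t => PySem.Str.isIn t text), 4),
     ((violation_type == "religious_freedom_violation") &&
        (["eliminate", "destroy", "persecute"].any fun t => PySem.Str.isIn t text), 3),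
     (violation_type == "religious_freedom_violation", 2),
     (violation_type == "natural_law_violation", 2),
     (violation_type == "treaty_violation", 2),
     (violation_type == "sacred_desecration", 3),
     (true, 1)]
  let levels := (rules.filter (·.1)).map (·.2)
  let level := (PySem.List.max? levels (fun x => x)).getD 0
  -- Python's names[level] never misses (level ∈ {1,2,3,4}); getD's default is unreachable
  PySem.Dict.getD levelNames level "MINOR_VIOLATION"

-- ===== PRECONDITION & SPEC =====
def Spec_assess_violation_severity (violation_type : String) (match_ : String) (out : String) : Prop := out = assess_violation_severity_alt violation_type match_
instance (violation_type : String) (match_ : String) (out : String) : Decidable (Spec_assess_violation_severity violation_type match_ out) := by unfold Spec_assess_violation_severity; infer_instance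

-- ===== CLAIM (what is proved, stated in full; the proofs are below) =====
def Claim_equal_assess_violation_severity : Prop := ∀ (violation_type : String) (match_ : String), Dom_assess_violation_severity violation_type match_ → Spec_assess_violation_severity violation_type match_ (assess_violation_severity violation_type match_)

-- ===== LEMMAS AND PROOFS =====

-- ===== VERDICT (by name: the statement is the Claim_ definition above) =====
theorem assess_violation_severity_spec : Claim_equal_assess_violation_severity := by
  intro vt m _
  unfold Spec_assess_violation_severity assess_violation_severity assess_violation_severity_alt
  cases hsw : (PySem.Str.isIn "swastika" (PySem.Str.lower m) &&
      (["nazi", "hitler", "supremacy"].any fun t => PySem.Str.isIn t (PySem.Str.lower m))) <;>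
  cases hkw : (["eliminate", "destroy", "persecute"].any fun t => PySem.Str.isIn t (PySem.Str.lower m)) <;>
  cases hr : (vt == "religious_freedom_violation") <;>
  cases hn : (vt == "natural_law_violation") <;>
  cases ht : (vt == "treaty_violation") <;>
  cases hs : (vt == "sacred_desecration") <;>
    simp only [hsw, hkw] <;> (try simp only [hr, hn, ht, hs]) <;>
    first
      | decide
      | simp_all
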